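-- pv_equiv track=rewrite | github.com/suyeonsu/algorithm | programmers/신고결과받기.py | solution
-- ===== SOURCE A (Python) =====
-- def solution(id_list, report, k):
--     answer = []
--     reported = {user:0 for user in id_list}
--     report_list = {user:set() for user in id_list}
--     black_list = set()
--
--     for r in report:
--         a, b = r.split()[0], r.split()[1]
--         if b not in report_list[a]:
--             report_list[a].add(b)
--             reported[b] += 1
--             if reported[b] >= k: black_list.add(b)
--
--     for user, repo in report_list.items():
--         answer.append(len(repo & black_list))
--
--     return answer
-- ===== SOURCE B (Python) =====
-- def solution(id_list, report, k):
--     # Brute force, no dicts/sets: dedupe by linear scan, then compute each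
--     # answer entry independently by counting over the deduped pair list.
--     pairs = []
--     for r in report:
--         p = (r.split()[0], r.split()[1])
--         if p not in pairs:
--             pairs.append(p)
--     users = []
--     for u in id_list:
--         if u not in users:
--             users.append(u)
--
--     def popular(b):
--         return k <= len([1 for x, y in pairs if y == b])
--
--     return [len([1 for x, y in pairs if x == u and popular(y)]) for u in users]
-- ===== Notes on version B (the rewrite author's own statement) =====
-- stated objective: alternative
-- what changed: A threads a single scan through three incrementally-updated structures (per-reporter sets, a report counter, a growing black list); B keeps no running state at all: it dedupes the pairs (and ids) by linear scans and then computes every answer entry independently by direct counting over the deduped pair list.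
import Mathlib
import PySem

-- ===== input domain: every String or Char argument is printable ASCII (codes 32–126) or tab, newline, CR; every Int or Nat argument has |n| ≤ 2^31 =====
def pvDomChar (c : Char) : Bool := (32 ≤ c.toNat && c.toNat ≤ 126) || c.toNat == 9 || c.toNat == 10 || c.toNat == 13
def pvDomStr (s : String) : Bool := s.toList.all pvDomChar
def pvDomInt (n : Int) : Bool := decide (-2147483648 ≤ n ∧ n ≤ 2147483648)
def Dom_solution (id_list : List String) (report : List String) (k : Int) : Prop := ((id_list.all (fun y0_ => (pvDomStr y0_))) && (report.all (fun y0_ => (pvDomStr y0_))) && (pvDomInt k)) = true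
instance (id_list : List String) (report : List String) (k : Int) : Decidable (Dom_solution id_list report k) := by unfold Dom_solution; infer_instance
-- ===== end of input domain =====

-- B drops all of A's running state (per-reporter sets, report counter, black list): it dedupes
-- the parsed pairs and the id list by plain linear scans and then computes every answer entry
-- independently by direct counting over the deduped pair list (brute force, no dicts or sets).

-- first two whitespace-separated tokens of a report line (used by both ports)
def pvParse (r : String) : String × String :=
  ((PySem.Str.split₀ r).getD 0 "", (PySem.Str.split₀ r).getD 1 "")

-- ===== PORT A =====
def solution (id_list : List String) (report : List String) (k : Int) : List Int :=
  let reported0 : PySem.Dict String Int := id_list.foldl (fun d u => d.insert u 0) PySem.Dict.empty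
  let rl0 : PySem.Dict String (PySem.Set String) :=
    id_list.foldl (fun d u => d.insert u PySem.Set.empty) PySem.Dict.empty
  let st :=
    report.foldl
      (fun (st : PySem.Dict String Int × PySem.Dict String (PySem.Set String) × PySem.Set String) r =>
        -- a, b = r.split()[0], r.split()[1]; raising accesses are total here via getD,
        -- Pre_solution restricts to inputs where Python does not raise
        let a := (pvParse r).1
        let b := (pvParse r).2
        let s := st.2.1.getD a PySem.Set.empty
        if b ∈ s then st
        else
          let rl := st.2.1.insert a (PySem.Set.add s b)
          let cntb := st.1.getD b 0 + 1
          let rep := st.1.insert b cntb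
          let bl := if k ≤ cntb then PySem.Set.add st.2.2 b else st.2.2
          (rep, rl, bl))
      (reported0, rl0, (PySem.Set.empty : PySem.Set String))
  st.2.1.items.map (fun p => ((PySem.Set.inter p.2 st.2.2).length : Int))

-- ===== PORT B =====
def solution_alt (id_list : List String) (report : List String) (k : Int) : List Int :=
  let pairs : List (String × String) :=
    report.foldl (fun acc r => if pvParse r ∈ acc then acc else acc ++ [pvParse r]) []
  let users : List String :=
    id_list.foldl (fun acc u => if u ∈ acc then acc else acc ++ [u]) []
  users.map (fun u =>
    ((pairs.filter (fun p => p.1 == u &&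
        decide (k ≤ ((pairs.filter (fun q => q.2 == p.2)).length : Int)))).length : Int))

-- ===== PRECONDITION & SPEC =====
-- Pre_ excludes exactly the inputs where Python A raises: a report line with fewer than two
-- tokens (IndexError) or naming a reporter/target absent from id_list (KeyError).
def Pre_solution (id_list : List String) (report : List String) (k : Int) : Prop :=
  ∀ r ∈ report, 2 ≤ (PySem.Str.split₀ r).length ∧ (pvParse r).1 ∈ id_list ∧ (pvParse r).2 ∈ id_list
instance (id_list : List String) (report : List String) (k : Int) : Decidable (Pre_solution id_list report k) := by unfold Pre_solution; infer_instance

def pvWitness_solution : List String × List String × Int :=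
  (["muzi", "frodo", "apeach"], ["muzi frodo", "apeach frodo", "frodo muzi", "muzi frodo"], 2)

def Spec_solution (id_list : List String) (report : List String) (k : Int) (out : List Int) : Prop := out = solution_alt id_list report k
instance (id_list : List String) (report : List String) (k : Int) (out : List Int) : Decidable (Spec_solution id_list report k out) := by unfold Spec_solution; infer_instance

-- ===== CLAIM (what is proved, stated in full; the proofs are below) =====
def Claim_equal_solution : Prop := ∀ (id_list : List String) (report : List String) (k : Int), Dom_solution id_list report k → Pre_solution id_list report k → Spec_solution id_list report k (solution id_list report k)

-- ===== LEMMAS AND PROOFS =====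

-- A's loop state and its per-pair step (what A's loop body does to the triple
-- (reported, report_list, black_list) for a parsed pair p)
def pvStep (k : Int)
    (st : PySem.Dict String Int × PySem.Dict String (PySem.Set String) × PySem.Set String)
    (p : String × String) :
    PySem.Dict String Int × PySem.Dict String (PySem.Set String) × PySem.Set String :=
  let s := st.2.1.getD p.1 PySem.Set.empty
  if p.2 ∈ s then st
  else
    (st.1.insert p.2 (st.1.getD p.2 0 + 1),
     st.2.1.insert p.1 (PySem.Set.add s p.2),
     if k ≤ st.1.getD p.2 0 + 1 then PySem.Set.add st.2.2 p.2 else st.2.2)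

-- targets reported by a (in order) among a pair list, and the report count of a target
def pvTargets (L : List (String × String)) (a : String) : List String :=
  (L.filter (fun p => p.1 == a)).map Prod.snd
def pvCnt (L : List (String × String)) (b : String) : Nat := (L.map Prod.snd).count b

lemma pvMem_targets (L : List (String × String)) (a b : String) :
    b ∈ pvTargets L a ↔ (a, b) ∈ L := by
  simp only [pvTargets, List.mem_map, List.mem_filter, beq_iff_eq]
  constructor
  · rintro ⟨p, ⟨hp, h1⟩, h2⟩; cases p; subst h1; subst h2; simpa using hp
  · intro h; exact ⟨(a, b), ⟨h, rfl⟩, rfl⟩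

lemma pvGetD_foldl_insert_const {κ ν : Type} [DecidableEq κ] [BEq κ] [LawfulBEq κ]
    (l : List κ) (c : ν) (a : κ) (d : PySem.Dict κ ν) (h : d.getD a c = c) :
    (l.foldl (fun d u => d.insert u c) d).getD a c = c := by
  induction l generalizing d with
  | nil => exact h
  | cons x xs ih =>
      simp only [List.foldl_cons]
      exact ih _ (by rw [PySem.Dict.getD_insert]; split <;> simp [h])

lemma pvKeys_foldl_insert_const {κ ν : Type} [BEq κ] [LawfulBEq κ]
    (l : List κ) (c : ν) :
    (l.foldl (fun d u => d.insert u c) PySem.Dict.empty).keys = PySem.Set.ofList l := by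
  rw [PySem.Dict.keys_foldl_insert]
  simp [PySem.Set.update_nil_left, PySem.Dict.keys_empty]

-- A's initial loop state
def pvInit (id_list : List String) :
    PySem.Dict String Int × PySem.Dict String (PySem.Set String) × PySem.Set String :=
  (id_list.foldl (fun d u => d.insert u 0) PySem.Dict.empty,
   id_list.foldl (fun d u => d.insert u PySem.Set.empty) PySem.Dict.empty,
   PySem.Set.empty)

-- the main invariant of A's loop over the parsed pair list L
lemma pvInv (id_list : List String) (k : Int) (L : List (String × String))
    (hL : ∀ p ∈ L, p.1 ∈ id_list ∧ p.2 ∈ id_list) :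
    (L.foldl (pvStep k) (pvInit id_list)).2.1.keys = PySem.Set.ofList id_list
    ∧ (∀ a, (L.foldl (pvStep k) (pvInit id_list)).2.1.getD a PySem.Set.empty
            = pvTargets (PySem.Set.ofList L) a)
    ∧ (∀ b, (L.foldl (pvStep k) (pvInit id_list)).1.getD b 0 = (pvCnt (PySem.Set.ofList L) b : Int))
    ∧ (∀ b, b ∈ (L.foldl (pvStep k) (pvInit id_list)).2.2
            ↔ b ∈ (PySem.Set.ofList L).map Prod.snd ∧ k ≤ (pvCnt (PySem.Set.ofList L) b : Int)) := by
  induction L using List.reverseRecOn with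
  | nil =>
      refine ⟨pvKeys_foldl_insert_const id_list PySem.Set.empty, ?_, ?_, ?_⟩
      · intro a
        simpa [pvTargets, PySem.Set.ofList_nil, pvInit] using
          pvGetD_foldl_insert_const id_list PySem.Set.empty a PySem.Dict.empty (by simp [PySem.Dict.getD_empty])
      · intro b
        simpa [pvCnt, PySem.Set.ofList_nil, pvInit] using
          pvGetD_foldl_insert_const id_list (0 : Int) b PySem.Dict.empty (by simp [PySem.Dict.getD_empty])
      · intro b; simp [pvInit, PySem.Set.ofList_nil, PySem.Set.empty, pvCnt]
  | append_singleton L q ih =>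
      have hL' : ∀ p ∈ L, p.1 ∈ id_list ∧ p.2 ∈ id_list := fun p hp => hL p (by simp [hp])
      obtain ⟨ihk, ihr, ihc, ihb⟩ := ih hL'
      have hq1 : q.1 ∈ id_list := (hL q (by simp)).1
      set st := L.foldl (pvStep k) (pvInit id_list) with hst
      set S := PySem.Set.ofList L with hS
      rw [List.foldl_append, List.foldl_cons, List.foldl_nil]
      rw [PySem.Set.ofList_append_singleton, ← hS]
      by_cases hq : q ∈ S
      · have hmem : q.2 ∈ st.2.1.getD q.1 PySem.Set.empty := by
          rw [ihr q.1, pvMem_targets]; simpa using hq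
        simp only [PySem.Set.empty] at hmem
        have hskip : pvStep k st q = st := by simp [pvStep, hmem]
        rw [hskip, PySem.Set.add_of_mem hq]
        exact ⟨ihk, ihr, ihc, ihb⟩
      · have hadd : PySem.Set.add S q = S ++ [q] := PySem.Set.add_of_not_mem hq
        have hmem : q.2 ∉ st.2.1.getD q.1 PySem.Set.empty := by
          rw [ihr q.1, pvMem_targets]; simpa using hq
        simp only [PySem.Set.empty] at hmem
        have h1 : (pvStep k st q).1 = st.1.insert q.2 (st.1.getD q.2 0 + 1) := by
          simp [pvStep, hmem]
        have h2 : (pvStep k st q).2.1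
            = st.2.1.insert q.1 (PySem.Set.add (st.2.1.getD q.1 PySem.Set.empty) q.2) := by
          simp [pvStep, hmem]
        have h3 : (pvStep k st q).2.2
            = if k ≤ st.1.getD q.2 0 + 1 then PySem.Set.add st.2.2 q.2 else st.2.2 := by
          simp [pvStep, hmem]
        have hnotmem_t : q.2 ∉ pvTargets S q.1 := by rw [pvMem_targets]; simpa using hq
        have hcnt_app : ∀ b, (pvCnt (S ++ [q]) b : Int) = (pvCnt S b : Int) + (if q.2 = b then 1 else 0) := by
          intro b
          by_cases h : q.2 = b
          · subst h; simp [pvCnt, List.count_append]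
          · simp [pvCnt, List.count_append, h]
        rw [hadd]
        refine ⟨?_, ?_, ?_, ?_⟩
        · rw [h2, PySem.Dict.keys_insert_of_contains, ihk]
          rw [PySem.Dict.contains_iff_mem_keys, ihk, PySem.Set.mem_ofList]
          exact hq1
        · intro a
          rw [h2, PySem.Dict.getD_insert, ihr q.1]
          have htargets : pvTargets (S ++ [q]) a
              = pvTargets S a ++ (if q.1 = a then [q.2] else []) := by
            simp only [pvTargets, List.filter_append]
            rw [List.map_append]
            congr 1
            by_cases h : q.1 = a <;> simp [h]
          rw [htargets]
          by_cases h : a = q.1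
          · subst h
            rw [if_pos rfl, if_pos rfl, PySem.Set.add_of_not_mem hnotmem_t]
          · rw [if_neg h, if_neg (show ¬ (q.1 = a) from fun hh => h hh.symm),
               List.append_nil, ihr a]
        · intro b
          rw [h1, PySem.Dict.getD_insert, hcnt_app b]
          by_cases h : b = q.2
          · subst h; rw [if_pos rfl, if_pos rfl, ihc q.2]
          · rw [if_neg h, if_neg (show ¬ (q.2 = b) from fun hh => h hh.symm), add_zero, ihc b]
        · intro b
          have hmapapp : b ∈ (S ++ [q]).map Prod.snd ↔ b ∈ S.map Prod.snd ∨ b = q.2 := by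
            simp [List.map_append, eq_comm]
          rw [h3, hcnt_app b, hmapapp]
          by_cases hb : b = q.2
          · subst hb
            rw [if_pos rfl]
            by_cases hk : k ≤ st.1.getD q.2 0 + 1
            · rw [if_pos hk]
              rw [ihc q.2] at hk
              simp only [PySem.Set.mem_add]
              exact ⟨fun _ => ⟨Or.inr (by simp), hk⟩, fun _ => Or.inr (by simp)⟩
            · rw [if_neg hk]
              rw [ihc q.2] at hk
              rw [ihb q.2]
              constructor
              · rintro ⟨_, h2'⟩; exact absurd (by omega : k ≤ (pvCnt S q.2 : Int) + 1) hk
              · rintro ⟨_, h2'⟩; exact absurd h2' hk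
          · rw [if_neg (show ¬ (q.2 = b) from fun hh => hb hh.symm), add_zero]
            have hiff : (b ∈ S.map Prod.snd ∨ b = q.2) ↔ b ∈ S.map Prod.snd := by simp [hb]
            rw [hiff]
            by_cases hk : k ≤ st.1.getD q.2 0 + 1
            · rw [if_pos hk, PySem.Set.mem_add, ihb b]
              simp [hb]
            · rw [if_neg hk]; exact ihb b

lemma solution_eq (id_list : List String) (report : List String) (k : Int)
    (hPre : Pre_solution id_list report k) :
    solution id_list report k
      = (PySem.Set.ofList id_list).map
          (fun u => ((pvTargets (PySem.Set.ofList (report.map pvParse)) u).countP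
              (fun b => decide (k ≤ (pvCnt (PySem.Set.ofList (report.map pvParse)) b : Int))) : Int)) := by
  have hL : ∀ p ∈ report.map pvParse, p.1 ∈ id_list ∧ p.2 ∈ id_list := by
    intro p hp
    obtain ⟨r, hr, rfl⟩ := List.mem_map.mp hp
    exact ⟨(hPre r hr).2.1, (hPre r hr).2.2⟩
  obtain ⟨ihk, ihr, _, ihb⟩ := pvInv id_list k (report.map pvParse) hL
  have hunf : solution id_list report k
      = ((report.map pvParse).foldl (pvStep k) (pvInit id_list)).2.1.items.map
          (fun p => ((PySem.Set.inter p.2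
              ((report.map pvParse).foldl (pvStep k) (pvInit id_list)).2.2).length : Int)) := by
    unfold solution pvInit
    rw [List.foldl_map]
    rfl
  set st := (report.map pvParse).foldl (pvStep k) (pvInit id_list) with hstd
  rw [hunf,
    PySem.Dict.items_eq_map_keys st.2.1 (by rw [ihk]; exact PySem.Set.nodup_ofList id_list)
      PySem.Set.empty,
    ihk, List.map_map]
  apply List.map_congr_left
  intro u hu
  simp only [Function.comp]
  rw [ihr u]
  have hlen : (PySem.Set.inter (pvTargets (PySem.Set.ofList (report.map pvParse)) u) st.2.2).length
      = (pvTargets (PySem.Set.ofList (report.map pvParse)) u).countP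
          (fun b => decide (k ≤ (pvCnt (PySem.Set.ofList (report.map pvParse)) b : Int))) := by
    unfold PySem.Set.inter
    rw [← List.countP_eq_length_filter]
    apply List.countP_congr
    intro b hb
    have hbmem : b ∈ (PySem.Set.ofList (report.map pvParse)).map Prod.snd :=
      List.mem_map.mpr ⟨(u, b), (pvMem_targets _ u b).mp hb, rfl⟩
    simp only [PySem.Set.contains_iff, ihb b, decide_eq_true_eq]
    simp [hbmem]
  rw [hlen]

-- B's two dedup folds are exactly PySem.Set.ofList
lemma pvDedup_fold {α : Type} [DecidableEq α] (l : List α) :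
    l.foldl (fun acc x => if x ∈ acc then acc else acc ++ [x]) [] = PySem.Set.ofList l := by
  rw [PySem.Set.ofList_eq_foldl]
  congr 1
  funext acc x
  simp [PySem.Set.add]

lemma solution_alt_eq (id_list : List String) (report : List String) (k : Int) :
    solution_alt id_list report k
      = (PySem.Set.ofList id_list).map
          (fun u => (((PySem.Set.ofList (report.map pvParse)).filter
              (fun p => p.1 == u &&
                decide (k ≤ (((PySem.Set.ofList (report.map pvParse)).filter
                    (fun q => q.2 == p.2)).length : Int)))).length : Int)) := by
  unfold solution_alt
  have hpairs : report.foldl (fun acc r => if pvParse r ∈ acc then acc else acc ++ [pvParse r]) []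
      = PySem.Set.ofList (report.map pvParse) := by
    rw [PySem.Set.ofList_eq_foldl, List.foldl_map]
    congr 1
    funext acc r
    simp [PySem.Set.add]
  rw [hpairs, pvDedup_fold]

-- ===== VERDICT (by name: the statement is the Claim_ definition above) =====
theorem solution_spec : Claim_equal_solution := by
  intro id_list report k _hDom hPre
  unfold Spec_solution
  rw [solution_eq id_list report k hPre, solution_alt_eq id_list report k]
  apply List.map_congr_left
  intro u _hu
  congr 1
  set S := PySem.Set.ofList (report.map pvParse) with hS
  have hcnt : ∀ b, (S.filter (fun q => q.2 == b)).length = pvCnt S b := by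
    intro b
    rw [← List.countP_eq_length_filter, pvCnt, List.count_eq_countP, List.countP_map]
    rfl
  unfold pvTargets
  rw [List.countP_map, List.countP_filter, ← List.countP_eq_length_filter]
  apply List.countP_congr
  intro p _hp
  simp [Function.comp, hcnt p.2, Bool.and_comm]
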